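-- pv_equiv track=rewrite | github.com/sunzhaoc/NEW1919 | weekcom/Week 237/5737. 所有数对按位与结果的异或和.py | getXORSum
-- ===== SOURCE A (Python) =====
-- from typing import List
--
-- def getXORSum(arr1: List[int], arr2: List[int]) -> int:
--     res = 0
--
--     A = []
--     for x in arr2:
--         res ^= x
--
--     for x in arr1:
--         A.append(x&res)
--
--     res = 0
--     for x in A:
--         res ^= x
--
--     return res
-- ===== SOURCE B (Python) =====
-- from functools import reduce
-- from operator import xor
-- from typing import List
--
-- def getXORSum(arr1: List[int], arr2: List[int]) -> int:
--     return reduce(xor, arr1, 0) & reduce(xor, arr2, 0)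
-- ===== Notes on version B (the rewrite author's own statement) =====
-- stated objective: simpler
-- what changed: B replaces A's three loops and intermediate ANDed list with two XOR folds and a single final AND, using the identity XOR_i (a_i & r) = (XOR_i a_i) & r.
import Mathlib
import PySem

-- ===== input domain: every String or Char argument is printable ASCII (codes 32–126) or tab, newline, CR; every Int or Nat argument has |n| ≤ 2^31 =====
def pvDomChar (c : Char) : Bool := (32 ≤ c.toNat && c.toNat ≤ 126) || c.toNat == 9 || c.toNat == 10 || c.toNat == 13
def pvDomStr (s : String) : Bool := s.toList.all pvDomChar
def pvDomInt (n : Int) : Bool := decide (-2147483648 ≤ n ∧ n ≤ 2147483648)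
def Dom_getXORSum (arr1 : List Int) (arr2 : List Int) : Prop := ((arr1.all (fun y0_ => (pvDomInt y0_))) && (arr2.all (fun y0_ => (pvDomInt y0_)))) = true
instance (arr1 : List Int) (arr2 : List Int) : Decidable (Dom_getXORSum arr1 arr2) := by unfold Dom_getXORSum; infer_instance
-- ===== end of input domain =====

-- B replaces A's three loops and intermediate ANDed list with two XOR folds and one final AND (simpler decomposition); return value only, no mutation involved.


-- ===== PORT A =====
-- literal transliteration: res = XOR of arr2; A = list of x&res over arr1; res = XOR of A
def getXORSum (arr1 : List Int) (arr2 : List Int) : Int :=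
  let res := arr2.foldl (fun res x => PySem.Int.bxor res x) 0
  let A := arr1.foldl (fun A x => A ++ [PySem.Int.band x res]) ([] : List Int)
  A.foldl (fun res x => PySem.Int.bxor res x) 0

-- ===== PORT B =====
def getXORSum_alt (arr1 : List Int) (arr2 : List Int) : Int :=
  PySem.Int.band (arr1.foldl PySem.Int.bxor 0) (arr2.foldl PySem.Int.bxor 0)

-- ===== PRECONDITION & SPEC =====
def Spec_getXORSum (arr1 : List Int) (arr2 : List Int) (out : Int) : Prop := out = getXORSum_alt arr1 arr2
instance (arr1 : List Int) (arr2 : List Int) (out : Int) : Decidable (Spec_getXORSum arr1 arr2 out) := by unfold Spec_getXORSum; infer_instance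

-- ===== CLAIM (what is proved, stated in full; the proofs are below) =====
def Claim_equal_getXORSum : Prop := ∀ (arr1 : List Int) (arr2 : List Int), Dom_getXORSum arr1 arr2 → Spec_getXORSum arr1 arr2 (getXORSum arr1 arr2)

-- ===== LEMMAS AND PROOFS =====

-- Nat: the AND-part and the LDIFF-part of m (w.r.t. n) partition m
theorem pv_ldiff_add_and (m n : Nat) : (m &&& n) + m.ldiff n = m := by
  induction m using Nat.binaryRec generalizing n with
  | zero =>
    have h1 : 0 &&& n = 0 := by apply Nat.eq_of_testBit_eq; intro k; simp
    have h2 : Nat.ldiff 0 n = 0 := by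
      apply Nat.eq_of_testBit_eq; intro k; simp [Nat.testBit_ldiff]
    rw [h1, h2]
  | bit b m' ih =>
    induction n using Nat.binaryRec with
    | zero =>
      have h1 : Nat.bit b m' &&& 0 = 0 := by apply Nat.eq_of_testBit_eq; intro k; simp
      have h2 : (Nat.bit b m').ldiff 0 = Nat.bit b m' := by
        apply Nat.eq_of_testBit_eq; intro k; simp [Nat.testBit_ldiff]
      rw [h1, h2]; omega
    | bit d n' _ =>
      rw [Nat.land_bit, Nat.ldiff_bit, Nat.bit_val, Nat.bit_val, Nat.bit_val]
      have h := ih n'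
      cases b <;> cases d <;>
        simp only [Bool.and_false, Bool.and_true, Bool.not_true, Bool.not_false,
          Bool.toNat_false, Bool.toNat_true] <;> omega

-- a Nat's bits vanish at index max m n
theorem pv_testBit_max_left (m n : Nat) : m.testBit (max m n) = false :=
  Nat.testBit_eq_false_of_lt
    (lt_of_lt_of_le Nat.lt_two_pow_self (Nat.pow_le_pow_right (by norm_num) (le_max_left m n)))

theorem pv_testBit_max_right (m n : Nat) : n.testBit (max m n) = false :=
  Nat.testBit_eq_false_of_lt
    (lt_of_lt_of_le Nat.lt_two_pow_self (Nat.pow_le_pow_right (by norm_num) (le_max_right m n)))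

-- two Ints with the same bits are equal
theorem pv_int_testBit_ext (a b : Int) (h : ∀ k, a.testBit k = b.testBit k) : a = b := by
  cases a with
  | ofNat m =>
    cases b with
    | ofNat n => congr 1; apply Nat.eq_of_testBit_eq; intro k; exact h k
    | negSucc n =>
      exfalso
      have hk := h (max m n)
      have h1 := pv_testBit_max_left m n
      have h2 := pv_testBit_max_right m n
      have : m.testBit (max m n) = !(n.testBit (max m n)) := hk
      rw [h1, h2] at this; exact Bool.noConfusion this
  | negSucc m =>
    cases b with
    | ofNat n =>
      exfalso
      have hk := h (max m n)
      have h1 := pv_testBit_max_left m n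
      have h2 := pv_testBit_max_right m n
      have : (!(m.testBit (max m n))) = n.testBit (max m n) := hk
      rw [h1, h2] at this; exact Bool.noConfusion this
    | negSucc n =>
      congr 1
      apply Nat.eq_of_testBit_eq; intro k
      have hk : (!(m.testBit k)) = !(n.testBit k) := h k
      exact Bool.not_inj hk

-- PySem's Python-exact band/bxor coincide with Mathlib's Int.land / Int.xor
theorem pv_band_eq_land (a b : Int) : PySem.Int.band a b = Int.land a b := by
  cases a with
  | ofNat m =>
    cases b with
    | ofNat n => simp [PySem.Int.band, Int.land]
    | negSucc n =>
      have hb : ¬ (0 : Int) ≤ Int.negSucc n := by simp [Int.negSucc_eq]; omega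
      have hn : -(Int.negSucc n) - 1 = (n : Int) := by simp [Int.negSucc_eq]
      have hm : (Int.ofNat m).toNat = m := rfl
      simp only [PySem.Int.band, hb, if_false, hn, Int.toNat_natCast, hm]
      rw [if_pos (by exact Int.natCast_nonneg m)]
      simp only [Int.land]
      have := pv_ldiff_add_and m n
      omega
  | negSucc m =>
    have ha : ¬ (0 : Int) ≤ Int.negSucc m := by simp [Int.negSucc_eq]; omega
    have hm : -(Int.negSucc m) - 1 = (m : Int) := by simp [Int.negSucc_eq]
    cases b with
    | ofNat n =>
      have hn : (Int.ofNat n).toNat = n := rfl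
      simp only [PySem.Int.band, ha, if_false, hm, Int.toNat_natCast, hn]
      rw [if_pos (by exact Int.natCast_nonneg n)]
      simp only [Int.land]
      have := pv_ldiff_add_and n m
      omega
    | negSucc n =>
      have hb : ¬ (0 : Int) ≤ Int.negSucc n := by simp [Int.negSucc_eq]; omega
      have hn : -(Int.negSucc n) - 1 = (n : Int) := by simp [Int.negSucc_eq]
      simp only [PySem.Int.band, ha, hb, if_false, hm, hn, Int.toNat_natCast, Int.land]
      simp [Int.negSucc_eq]
      ring

theorem pv_bxor_eq_xor (a b : Int) : PySem.Int.bxor a b = Int.xor a b := by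
  cases a with
  | ofNat m =>
    cases b with
    | ofNat n => simp [PySem.Int.bxor, Int.xor]
    | negSucc n =>
      have hb : ¬ (0 : Int) ≤ Int.negSucc n := by simp [Int.negSucc_eq]; omega
      have hn : -(Int.negSucc n) - 1 = (n : Int) := by simp [Int.negSucc_eq]
      have hm : (Int.ofNat m).toNat = m := rfl
      simp only [PySem.Int.bxor, hb, if_false, hn, Int.toNat_natCast, hm]
      rw [if_pos (by exact Int.natCast_nonneg m)]
      simp [Int.xor, Int.negSucc_eq]
      ring
  | negSucc m =>
    have ha : ¬ (0 : Int) ≤ Int.negSucc m := by simp [Int.negSucc_eq]; omega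
    have hm : -(Int.negSucc m) - 1 = (m : Int) := by simp [Int.negSucc_eq]
    cases b with
    | ofNat n =>
      have hn : (Int.ofNat n).toNat = n := rfl
      simp only [PySem.Int.bxor, ha, if_false, hm, Int.toNat_natCast, hn]
      rw [if_pos (by exact Int.natCast_nonneg n)]
      simp [Int.xor, Int.negSucc_eq]
      ring
    | negSucc n =>
      have hb : ¬ (0 : Int) ≤ Int.negSucc n := by simp [Int.negSucc_eq]; omega
      have hn : -(Int.negSucc n) - 1 = (n : Int) := by simp [Int.negSucc_eq]
      simp only [PySem.Int.bxor, ha, hb, if_false, hm, hn, Int.toNat_natCast, Int.xor]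

theorem pv_bxor_assoc (a b c : Int) :
    PySem.Int.bxor (PySem.Int.bxor a b) c = PySem.Int.bxor a (PySem.Int.bxor b c) := by
  simp only [pv_bxor_eq_xor]
  apply pv_int_testBit_ext
  intro k
  simp only [Int.testBit_lxor, Bool.xor_assoc]

-- AND distributes over XOR
theorem pv_band_bxor_right (a b r : Int) :
    PySem.Int.band (PySem.Int.bxor a b) r
      = PySem.Int.bxor (PySem.Int.band a r) (PySem.Int.band b r) := by
  simp only [pv_bxor_eq_xor, pv_band_eq_land]
  apply pv_int_testBit_ext
  intro k
  simp only [Int.testBit_lxor, Int.testBit_land]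
  cases a.testBit k <;> cases b.testBit k <;> cases r.testBit k <;> rfl

-- bxor with 0 on the left
theorem pv_zero_bxor (a : Int) : PySem.Int.bxor 0 a = a := by
  rw [PySem.Int.bxor_comm, PySem.Int.bxor_zero]

-- band with 0 on the left
theorem pv_zero_band (a : Int) : PySem.Int.band 0 a = 0 := by
  rw [PySem.Int.band_comm, PySem.Int.band_zero]

-- XOR fold with accumulator b splits off as bxor b (fold from 0)
theorem pv_foldl_bxor_acc (l : List Int) (b : Int) :
    l.foldl PySem.Int.bxor b = PySem.Int.bxor b (l.foldl PySem.Int.bxor 0) := by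
  induction l generalizing b with
  | nil => simp [PySem.Int.bxor_zero]
  | cons y ys ih =>
    simp only [List.foldl]
    rw [ih, ih (PySem.Int.bxor 0 y), pv_zero_bxor, pv_bxor_assoc]

-- A's append-fold builds exactly acc ++ map (band · r) l
theorem pv_foldl_append_map (l : List Int) (r : Int) (acc : List Int) :
    l.foldl (fun A x => A ++ [PySem.Int.band x r]) acc
      = acc ++ l.map (fun x => PySem.Int.band x r) := by
  induction l generalizing acc with
  | nil => simp
  | cons x xs ih => simp only [List.foldl, ih]; simp

-- XOR of the (band · r)-mapped list, with accumulator a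
theorem pv_foldl_bxor_map (l : List Int) (r : Int) (a : Int) :
    (l.map (fun x => PySem.Int.band x r)).foldl (fun res x => PySem.Int.bxor res x) a
      = PySem.Int.bxor a (PySem.Int.band (l.foldl PySem.Int.bxor 0) r) := by
  induction l generalizing a with
  | nil => simp [pv_zero_band, PySem.Int.bxor_zero]
  | cons x xs ih =>
    simp only [List.map, List.foldl, ih]
    rw [pv_foldl_bxor_acc xs (PySem.Int.bxor 0 x), pv_zero_bxor, pv_band_bxor_right,
      pv_bxor_assoc]

-- ===== VERDICT (by name: the statement is the Claim_ definition above) =====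
theorem getXORSum_spec : Claim_equal_getXORSum := by
  intro arr1 arr2 _
  unfold Spec_getXORSum getXORSum getXORSum_alt
  simp only [pv_foldl_append_map, List.nil_append]
  rw [pv_foldl_bxor_map, pv_zero_bxor]
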